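-- pv_equiv track=rewrite | github.com/AsifJahish/pp2--21B031342- | tsis6/builtin-functions.md/task2.py | upperCount
-- ===== SOURCE A (Python) =====
-- def upperCount(st):
--     upper=0
--     lower=0
--     for i in range(len(st)):
--      if st[i].isupper():
--         upper += 1
--      elif st[i].islower():
--         lower +=1
--     return upper, lower
-- ===== SOURCE B (Python) =====
-- def upperCount(st):
--     freq = {}
--     for c in st:
--         freq[c] = freq.get(c, 0) + 1
--     upper = sum(freq.get(chr(k), 0) for k in range(65, 91))
--     lower = sum(freq.get(chr(k), 0) for k in range(97, 123))
--     return upper, lower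
-- ===== Notes on version B (the rewrite author's own statement) =====
-- stated objective: alternative
-- what changed: Replaces A's per-character isupper/islower if/elif loop by a frequency-dictionary algorithm: one pass builds a character counter, then the two results are the sums of the counter's entries over the 26 uppercase and 26 lowercase ASCII codes.
import Mathlib
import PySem

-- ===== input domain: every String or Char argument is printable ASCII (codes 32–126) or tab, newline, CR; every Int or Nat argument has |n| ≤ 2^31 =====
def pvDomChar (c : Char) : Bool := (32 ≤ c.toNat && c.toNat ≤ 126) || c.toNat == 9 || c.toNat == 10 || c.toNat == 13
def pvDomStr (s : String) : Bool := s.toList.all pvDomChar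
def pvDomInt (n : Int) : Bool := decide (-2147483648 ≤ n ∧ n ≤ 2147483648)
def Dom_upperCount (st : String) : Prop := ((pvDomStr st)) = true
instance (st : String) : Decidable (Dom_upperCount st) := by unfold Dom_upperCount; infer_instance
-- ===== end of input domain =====

-- B replaces A's per-character if/elif case tests by a one-pass character frequency dictionary whose counts are then summed over the 26 uppercase and 26 lowercase alphabet codes (alternative algorithm, same cost).


-- ===== PORT A =====
-- for i in range(len(st)): if st[i].isupper(): upper += 1 elif st[i].islower(): lower += 1
-- st[i] is always in range here, so the 'none' branch of pyGet? is unreachable (leaves acc unchanged).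
def upperCount (st : String) : Int × Int :=
  (PySem.List.pyRange 0 (PySem.Str.len st) 1).foldl
    (fun (acc : Int × Int) i =>
      match PySem.Str.pyGet? st i with
      | some c =>
          if PySem.Chars.isupper c then (acc.1 + 1, acc.2)
          else if PySem.Chars.islower c then (acc.1, acc.2 + 1)
          else acc
      | none => acc)
    (0, 0)

-- ===== PORT B =====
-- freq = {}; for c in st: freq[c] = freq.get(c, 0) + 1
-- upper = sum(freq.get(chr(k), 0) for k in range(65, 91)); lower likewise over range(97, 123).
-- chr(k) is ported as Char.ofNat k.toNat, exact here since 0 ≤ k < 123 < 0xD800.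
def upperCount_alt (st : String) : Int × Int :=
  let freq : PySem.Dict Char Int :=
    st.toList.foldl (fun d c => d.insert c (d.getD c 0 + 1)) PySem.Dict.empty
  (((PySem.List.pyRange 65 91 1).map (fun k => freq.getD (Char.ofNat k.toNat) 0)).sum,
   ((PySem.List.pyRange 97 123 1).map (fun k => freq.getD (Char.ofNat k.toNat) 0)).sum)

-- ===== PRECONDITION & SPEC =====
def Spec_upperCount (st : String) (out : Int × Int) : Prop := out = upperCount_alt st
instance (st : String) (out : Int × Int) : Decidable (Spec_upperCount st out) := by unfold Spec_upperCount; infer_instance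

-- ===== CLAIM (what is proved, stated in full; the proofs are below) =====
def Claim_equal_upperCount : Prop := ∀ (st : String), Dom_upperCount st → Spec_upperCount st (upperCount st)

-- ===== LEMMAS AND PROOFS =====

-- A's loop body applied to the character at the resolved index.
def pvStepA (acc : Int × Int) (c : Char) : Int × Int :=
  if PySem.Chars.isupper c then (acc.1 + 1, acc.2)
  else if PySem.Chars.islower c then (acc.1, acc.2 + 1)
  else acc

-- no character is both upper and lower
theorem pv_upper_not_lower {c : Char} (h : PySem.Chars.isupper c = true) :
    PySem.Chars.islower c = false := by
  simp [PySem.Chars.isupper] at h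
  simp [PySem.Chars.islower]
  intro hla
  exact absurd (le_trans hla h.2) (by decide)

-- inside the range every index resolves: the indexed fold is the fold over the characters
theorem pvFoldIdx (st : String) :
    upperCount st = st.toList.foldl pvStepA (0, 0) := by
  unfold upperCount
  rw [PySem.List.foldl_congr_mem _ _
      (fun acc j => pvStepA acc (PySem.List.pyGetD st.toList j ' ')) ((0 : Int), (0 : Int))
      (by
        intro acc x hx
        rw [PySem.List.mem_pyRange_one] at hx
        obtain ⟨h0, hlt⟩ := hx
        rw [PySem.Str.len_eq] at hlt
        obtain ⟨n, rfl⟩ := Int.eq_ofNat_of_zero_le h0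
        have hn : n < st.toList.length := by exact_mod_cast hlt
        have hsome : PySem.Str.pyGet? st (n : Int) = some st.toList[n] := by
          simp [PySem.Str.pyGet?, PySem.Chars.pyGet?, PySem.List.pyGet?_natCast]
        rw [hsome]
        have hget : st.toList[n]? = some st.toList[n] := List.getElem?_eq_getElem hn
        simp [PySem.List.pyGetD, PySem.List.pyGet?_natCast, hget, pvStepA])]
  rw [PySem.Str.len_eq]
  exact_mod_cast PySem.List.foldl_pyRange_zero_pyGetD st.toList ' ' pvStepA (0, 0)

-- the fused two-counter fold computed from arbitrary start counters
theorem pvFoldCounts (cs : List Char) (u l : Int) :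
    cs.foldl pvStepA (u, l) =
      (u + (cs.countP (fun c => PySem.Chars.isupper c) : Int),
       l + (cs.countP (fun c => PySem.Chars.islower c) : Int)) := by
  induction cs generalizing u l with
  | nil => simp
  | cons c cs ih =>
    by_cases hu : PySem.Chars.isupper c = true
    · have hl := pv_upper_not_lower hu
      simp [pvStepA, hu, hl, ih]
      omega
    · simp only [List.foldl_cons, pvStepA, hu]
      by_cases hl : PySem.Chars.islower c = true
      · simp [hl, hu, ih]
        omega
      · simp [hl, hu, ih]

-- the frequency dictionary looks up to the plain character count
theorem pvFreqCount (cs : List Char) (v : Char) :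
    (cs.foldl (fun d c => d.insert c (d.getD c 0 + 1)) (PySem.Dict.empty : PySem.Dict Char Int)).getD v 0
      = (cs.count v : Int) := by
  rw [PySem.Dict.getD_foldl_insert_add_one]
  simp [PySem.Dict.empty, PySem.Dict.getD, PySem.Dict.get?]

-- sum of an indicator over a duplicate-free key list is membership
theorem pvSumIndicator (ks : List Char) (c : Char) (hnd : ks.Nodup) :
    (ks.map (fun k => if k == c then (1 : Int) else 0)).sum = if c ∈ ks then (1 : Int) else 0 := by
  induction ks with
  | nil => simp
  | cons k ks ih =>
    rcases List.nodup_cons.mp hnd with ⟨hk, hnd'⟩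
    by_cases he : k = c
    · subst he
      have hz : (ks.map (fun x => if x == k then (1 : Int) else 0)).sum = 0 := by
        apply List.sum_eq_zero
        intro x hx
        rcases List.mem_map.mp hx with ⟨y, hy, rfl⟩
        have : ¬ (y = k) := fun h => hk (h ▸ hy)
        simp [this]
      rw [List.map_cons, List.sum_cons, hz]
      simp
    · have hb : (k == c) = false := by simp [he]
      rw [List.map_cons, List.sum_cons, ih hnd', hb]
      simp [List.mem_cons, Ne.symm he]

-- summing the character counts over a duplicate-free key list counts membership
theorem pvSumCounts (ks : List Char) (hnd : ks.Nodup) (cs : List Char) :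
    (ks.map (fun k => (cs.count k : Int))).sum = (cs.countP (fun c => c ∈ ks) : Int) := by
  induction cs with
  | nil => simp
  | cons c cs ih =>
    have hsplit : (ks.map (fun k => ((c :: cs).count k : Int))).sum
        = (ks.map (fun k => (cs.count k : Int))).sum
          + (ks.map (fun k => if k == c then (1 : Int) else 0)).sum := by
      rw [← PySem.List.sum_map_add_int]
      apply congrArg
      apply List.map_congr_left
      intro k _
      rw [List.count_cons]
      by_cases h : k = c
      · simp [h]
      · simp [h, Ne.symm h]
    rw [hsplit, ih, pvSumIndicator ks c hnd, List.countP_cons]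
    by_cases h : c ∈ ks <;> simp [h]
-- membership in the mapped code range is a bound on the code point
theorem pvMemChr (c : Char) (a b : Int) (ha : 0 ≤ a) (hb : b ≤ 55296) :
    (c ∈ (PySem.List.pyRange a b 1).map (fun k => Char.ofNat k.toNat)) ↔ (a ≤ (c.toNat : Int) ∧ (c.toNat : Int) < b) := by
  simp only [List.mem_map, PySem.List.mem_pyRange_one]
  constructor
  · rintro ⟨k, ⟨h1, h2⟩, rfl⟩
    have hv : (k.toNat).isValidChar := Or.inl (by omega)
    rw [Char.toNat_ofNat, if_pos hv]
    omega
  · intro ⟨h1, h2⟩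
    exact ⟨(c.toNat : Int), ⟨by omega, by omega⟩, by simp [Char.ofNat_toNat]⟩

-- the alphabet-range membership tests ARE the case predicates
theorem pvMemUpper (c : Char) :
    decide (c ∈ (PySem.List.pyRange 65 91 1).map (fun k => Char.ofNat k.toNat)) = PySem.Chars.isupper c := by
  rw [Bool.eq_iff_iff, decide_eq_true_iff, pvMemChr c 65 91 (by omega) (by omega)]
  simp [PySem.Chars.isupper, Char.le_def, UInt32.le_iff_toNat_le]
  omega

theorem pvMemLower (c : Char) :
    decide (c ∈ (PySem.List.pyRange 97 123 1).map (fun k => Char.ofNat k.toNat)) = PySem.Chars.islower c := by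
  rw [Bool.eq_iff_iff, decide_eq_true_iff, pvMemChr c 97 123 (by omega) (by omega)]
  simp [PySem.Chars.islower, Char.le_def, UInt32.le_iff_toNat_le]
  omega

-- B computes the same pair of predicate counts
theorem pvAltCounts (st : String) :
    upperCount_alt st =
      ((st.toList.countP (fun c => PySem.Chars.isupper c) : Int),
       (st.toList.countP (fun c => PySem.Chars.islower c) : Int)) := by
  unfold upperCount_alt
  have hu : ((PySem.List.pyRange 65 91 1).map (fun k =>
      (st.toList.foldl (fun d c => d.insert c (d.getD c 0 + 1)) PySem.Dict.empty).getD (Char.ofNat k.toNat) 0)).sum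
      = (st.toList.countP (fun c => PySem.Chars.isupper c) : Int) := by
    have := pvSumCounts ((PySem.List.pyRange 65 91 1).map (fun k => Char.ofNat k.toNat))
      (by decide) st.toList
    rw [List.map_map] at this
    simp only [Function.comp_def] at this
    simp only [pvFreqCount]
    rw [this]
    congr 1
    apply List.countP_congr
    intro c _
    simp [pvMemUpper c]
  have hl : ((PySem.List.pyRange 97 123 1).map (fun k =>
      (st.toList.foldl (fun d c => d.insert c (d.getD c 0 + 1)) PySem.Dict.empty).getD (Char.ofNat k.toNat) 0)).sum
      = (st.toList.countP (fun c => PySem.Chars.islower c) : Int) := by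
    have := pvSumCounts ((PySem.List.pyRange 97 123 1).map (fun k => Char.ofNat k.toNat))
      (by decide) st.toList
    rw [List.map_map] at this
    simp only [Function.comp_def] at this
    simp only [pvFreqCount]
    rw [this]
    congr 1
    apply List.countP_congr
    intro c _
    simp [pvMemLower c]
  exact Prod.ext (by simpa using hu) (by simpa using hl)

-- ===== VERDICT (by name: the statement is the Claim_ definition above) =====
theorem upperCount_spec : Claim_equal_upperCount := by
  intro st _
  unfold Spec_upperCount
  rw [pvFoldIdx, pvFoldCounts, pvAltCounts]
  simp
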